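-- pv_equiv track=rewrite | github.com/PocketGoblin/GoblinToolsv1 | core/error_goblin/parser.py | extract_key_lines
-- ===== SOURCE A (Python) =====
-- def extract_key_lines(text: str) -> list[str]:
--     lines = [ln.strip() for ln in (text or '').splitlines() if ln.strip()]
--     score_terms = (
--         'error',
--         'exception',
--         'traceback',
--         'invalid',
--         'null',
--         'nil',
--         'not found',
--         'failed',
--         'typeerror',
--         'keyerror',
--         'indexerror',
--         'attributeerror',
--         'nameerror',
--         'importerror',
--         'modulenotfounderror',
--         'jsondecodeerror',
--         'syntaxerror',
--         'indentationerror',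
--         'filenotfounderror',
--     )
--     scored = []
--     for ln in lines:
--         low = ln.lower()
--         score = sum(1 for s in score_terms if s in low)
--         if score > 0:
--             scored.append((score, ln))
--     scored.sort(key=lambda x: x[0], reverse=True)
--     out = [ln for _s, ln in scored[:6]]
--     return out if out else lines[:4]
-- ===== SOURCE B (Python) =====
-- def extract_key_lines(text: str) -> list[str]:
--     lines = [ln.strip() for ln in (text or '').splitlines() if ln.strip()]
--     score_terms = (
--         'error',
--         'exception',
--         'traceback',
--         'invalid',
--         'null',
--         'nil',
--         'not found',
--         'failed',
--         'typeerror',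
--         'keyerror',
--         'indexerror',
--         'attributeerror',
--         'nameerror',
--         'importerror',
--         'modulenotfounderror',
--         'jsondecodeerror',
--         'syntaxerror',
--         'indentationerror',
--         'filenotfounderror',
--     )
--     # distribution sort: bucket i holds (in input order) the lines scoring i
--     buckets = [[] for _ in range(len(score_terms) + 1)]
--     for ln in lines:
--         low = ln.lower()
--         score = 0
--         for s in score_terms:
--             if s in low:
--                 score += 1
--         if score:
--             buckets[score].append(ln)
--     out = []
--     for score in range(len(score_terms), 0, -1):
--         out.extend(buckets[score])
--     return out[:6] if out else lines[:4]
-- ===== Notes on version B (the rewrite author's own statement) =====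
-- stated objective: alternative
-- what changed: Replaces collecting (score, line) pairs and stably reverse-sorting them by score with a distribution sort: positive-scoring lines are appended in input order to per-score buckets, which are then emitted from the highest score down and truncated to 6.
import Mathlib
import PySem

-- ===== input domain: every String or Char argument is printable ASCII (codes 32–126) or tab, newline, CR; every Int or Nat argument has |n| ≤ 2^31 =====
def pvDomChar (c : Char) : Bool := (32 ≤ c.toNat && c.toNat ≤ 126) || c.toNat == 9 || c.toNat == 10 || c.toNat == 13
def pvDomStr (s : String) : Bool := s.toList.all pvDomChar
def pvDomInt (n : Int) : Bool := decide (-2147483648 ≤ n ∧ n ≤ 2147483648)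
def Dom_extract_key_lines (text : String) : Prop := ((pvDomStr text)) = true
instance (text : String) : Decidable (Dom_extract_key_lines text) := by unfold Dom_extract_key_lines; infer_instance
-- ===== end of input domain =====

-- B replaces A's comparison sort of (score, line) pairs by a distribution sort into
-- per-score buckets emitted from high score to low (alternative algorithm, same result).

-- shared helper: the identical first line of both Pythons
-- lines = [ln.strip() for ln in (text or '').splitlines() if ln.strip()]
def pvLines (text : String) : List String :=
  ((PySem.Str.splitlines text).filter (fun ln => PySem.Str.strip ln != "")).map PySem.Str.strip

def pvScoreTerms : List String :=
  ["error", "exception", "traceback", "invalid", "null", "nil", "not found", "failed",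
   "typeerror", "keyerror", "indexerror", "attributeerror", "nameerror", "importerror",
   "modulenotfounderror", "jsondecodeerror", "syntaxerror", "indentationerror", "filenotfounderror"]

-- ===== PORT A =====
def extract_key_lines (text : String) : List String :=
  let lines := pvLines text
  let scored := lines.foldl (fun (acc : List (Int × String)) ln =>
      let low := PySem.Str.lower ln
      let score : Int := (pvScoreTerms.map (fun s => if PySem.Str.isIn s low then (1 : Int) else 0)).sum
      if 0 < score then acc ++ [(score, ln)] else acc) []
  let sortedScored := PySem.List.sorted scored (fun p => p.1) true
  let out := (PySem.List.slice sortedScored none (some 6)).map (fun p => p.2)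
  if out ≠ [] then out else PySem.List.slice lines none (some 4)

-- ===== PORT B =====
def extract_key_lines_alt (text : String) : List String :=
  let lines := pvLines text
  let buckets := lines.foldl (fun (bks : List (List String)) ln =>
      let low := PySem.Str.lower ln
      let score : Int := pvScoreTerms.foldl (fun n s => if PySem.Str.isIn s low then n + 1 else n) 0
      if score ≠ 0 then PySem.List.pySetD bks score (PySem.List.pyGetD bks score [] ++ [ln]) else bks)
      (List.replicate 20 ([] : List String))
  let out := (PySem.List.pyRange 19 0 (-1)).foldl (fun out s => out ++ PySem.List.pyGetD buckets s []) []
  if out ≠ [] then PySem.List.slice out none (some 6) else PySem.List.slice lines none (some 4)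

-- ===== PRECONDITION & SPEC =====
def Spec_extract_key_lines (text : String) (out : List String) : Prop := out = extract_key_lines_alt text
instance (text : String) (out : List String) : Decidable (Spec_extract_key_lines text out) := by unfold Spec_extract_key_lines; infer_instance

-- ===== CLAIM (what is proved, stated in full; the proofs are below) =====
def Claim_equal_extract_key_lines : Prop := ∀ (text : String), Dom_extract_key_lines text → Spec_extract_key_lines text (extract_key_lines text)

-- ===== LEMMAS AND PROOFS =====

def pvCnt (ln : String) : Nat :=
  pvScoreTerms.countP (fun s => PySem.Str.isIn s (PySem.Str.lower ln))

lemma pvCnt_le (ln : String) : pvCnt ln ≤ 19 := by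
  unfold pvCnt
  exact le_trans List.countP_le_length (by simp [pvScoreTerms])

-- insertBy equation (transparent definition)
lemma pvInsertBy_cons {α : Type} (before : α → α → Bool) (x y : α) (ys : List α) :
    PySem.List.insertBy before x (y :: ys) =
      if before x y then x :: y :: ys else y :: PySem.List.insertBy before x ys := rfl

lemma pvInsertBy_append_false {α : Type} (before : α → α → Bool) (x : α)
    (as bs : List α) (h : ∀ a ∈ as, before x a = false) :
    PySem.List.insertBy before x (as ++ bs) = as ++ PySem.List.insertBy before x bs := by
  induction as with
  | nil => simp
  | cons a as ih =>
      simp only [List.cons_append, pvInsertBy_cons, h a (by simp)]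
      simp only [Bool.false_eq_true, if_false]
      rw [ih (fun a ha => h a (by simp [ha]))]

lemma pvInsertBy_all_true {α : Type} (before : α → α → Bool) (x : α)
    (bs : List α) (h : ∀ b ∈ bs, before x b = true) :
    PySem.List.insertBy before x bs = x :: bs := by
  cases bs with
  | nil => rfl
  | cons b bs => simp [pvInsertBy_cons, h b (by simp)]

-- stable reverse sort = concatenation of the score buckets, highest score first
lemma pvSortedRevFlatMap {α : Type} (key : α → Int) (l : List Int)
    (hl : l.Pairwise (fun a b => b < a)) :
    ∀ xs : List α, (∀ a ∈ xs, key a ∈ l) →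
    PySem.List.sorted xs key true = l.flatMap (fun s => xs.filter (fun a => key a == s)) := by
  intro xs
  induction xs using List.reverseRecOn with
  | nil => simp [PySem.List.sorted]
  | append_singleton xs x ih =>
      intro hmem
      have hk : key x ∈ l := hmem x (by simp)
      obtain ⟨l1, l2, rfl⟩ := List.append_of_mem hk
      have hp := List.pairwise_append.1 hl
      have h1 : ∀ s ∈ l1, key x < s := fun s hs => (hp.2.2 s hs (key x) (by simp))
      have h2 : ∀ s ∈ l2, s < key x := fun s hs => (List.pairwise_cons.1 hp.2.1).1 s hs
      rw [PySem.List.sorted_rev_eq_foldl_insertBy, List.foldl_append, List.foldl_cons,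
        List.foldl_nil, ← PySem.List.sorted_rev_eq_foldl_insertBy,
        ih (fun a ha => hmem a (by simp [ha]))]
      -- abbreviations
      set g : Int → List α := fun s => xs.filter (fun a => key a == s) with hg
      have hflat : (l1 ++ key x :: l2).flatMap g
          = (l1.flatMap g ++ g (key x)) ++ l2.flatMap g := by
        simp [List.flatMap_append]
      rw [hflat, pvInsertBy_append_false _ _ _ _ (by
        intro a ha
        rcases List.mem_append.1 ha with ha | ha
        · obtain ⟨s, hs, ha⟩ := List.mem_flatMap.1 ha
          have : key a = s := by simpa using (List.mem_filter.1 ha).2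
          simp [this]
          exact le_of_lt (h1 s hs)
        · have : key a = key x := by simpa using (List.mem_filter.1 ha).2
          simp [this]),
        pvInsertBy_all_true _ _ _ (by
          intro b hb
          obtain ⟨s, hs, hb⟩ := List.mem_flatMap.1 hb
          have : key b = s := by simpa using (List.mem_filter.1 hb).2
          simp [this]
          exact h2 s hs)]
      -- now compute the RHS for xs ++ [x]
      have hfil : ∀ s : Int, (xs ++ [x]).filter (fun a => key a == s)
          = g s ++ (if key x == s then [x] else []) := by
        intro s
        simp only [List.filter_append, hg]
        cases h : key x == s <;> simp [List.filter, h]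
      have hL1 : l1.flatMap (fun s => (xs ++ [x]).filter (fun a => key a == s)) = l1.flatMap g := by
        refine List.flatMap_congr ?_
        intro s hs
        rw [hfil s]
        have : (key x == s) = false := by
          have := h1 s hs; simp; omega
        simp [this]
      have hL2 : l2.flatMap (fun s => (xs ++ [x]).filter (fun a => key a == s)) = l2.flatMap g := by
        refine List.flatMap_congr ?_
        intro s hs
        rw [hfil s]
        have : (key x == s) = false := by
          have := h2 s hs; simp; omega
        simp [this]
      have hK : (xs ++ [x]).filter (fun a => key a == key x) = g (key x) ++ [x] := by
        rw [hfil (key x)]; simp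
      simp only [List.flatMap_append, List.flatMap_cons, hL1, hL2, hK]
      simp [List.append_assoc]

-- B-side buckets characterisation
lemma pvBuckets (lines : List String) :
    ∀ (bks : List (List String)), bks.length = 20 →
    (lines.foldl (fun bks ln =>
        if ((pvCnt ln : Int)) ≠ 0 then
          PySem.List.pySetD bks (pvCnt ln) (PySem.List.pyGetD bks (pvCnt ln) [] ++ [ln])
        else bks) bks).length = 20 ∧
    ∀ s : Int, 1 ≤ s → s ≤ 19 →
      PySem.List.pyGetD (lines.foldl (fun bks ln =>
        if ((pvCnt ln : Int)) ≠ 0 then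
          PySem.List.pySetD bks (pvCnt ln) (PySem.List.pyGetD bks (pvCnt ln) [] ++ [ln])
        else bks) bks) s []
      = PySem.List.pyGetD bks s [] ++ lines.filter (fun ln => ((pvCnt ln : Int)) == s) := by
  induction lines with
  | nil => intro bks h; exact ⟨h, fun s _ _ => by simp⟩
  | cons ln lines ih =>
      intro bks h
      simp only [List.foldl_cons]
      by_cases hk : ((pvCnt ln : Int)) = 0
      · rw [if_neg (fun hc => hc hk)]
        obtain ⟨hlen, hget⟩ := ih bks h
        refine ⟨hlen, fun s h1 h2 => ?_⟩
        rw [hget s h1 h2]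
        have hne : (((pvCnt ln : Int)) == s) = false := by simp; omega
        simp [List.filter, hne]
      · rw [if_pos hk]
        have hk19 : pvCnt ln ≤ 19 := pvCnt_le ln
        have hlen' : (PySem.List.pySetD bks (pvCnt ln)
            (PySem.List.pyGetD bks (pvCnt ln) [] ++ [ln])).length = 20 := by
          rw [PySem.List.length_pySetD]; exact h
        obtain ⟨hlen, hget⟩ := ih _ hlen'
        refine ⟨hlen, fun s h1 h2 => ?_⟩
        rw [hget s h1 h2]
        rw [PySem.List.pySetD_of_nonneg _ _ (by positivity)]
        by_cases hs : ((pvCnt ln : Int)) = s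
        · rw [hs]
          rw [PySem.List.pyGetD_eq_getElem _ _ (by omega) (by simp [h]; omega),
              List.getElem_set_self]
          have heq : (((pvCnt ln : Int)) == s) = true := by simpa using hs
          simp [List.filter, heq]
        · rw [PySem.List.pyGetD_eq_getElem _ _ (by omega) (by simp [h]; omega),
              List.getElem_set_ne (by omega),
              ← PySem.List.pyGetD_eq_getElem bks ([] : List String) (by omega) (by rw [h]; omega)]
          have hne : (((pvCnt ln : Int)) == s) = false := by simpa using hs
          simp [List.filter, hne]

-- main equation over a cleaned line list
lemma pvMain (lines : List String) :
    (let scored := lines.foldl (fun (acc : List (Int × String)) ln =>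
        let low := PySem.Str.lower ln
        let score : Int := (pvScoreTerms.map (fun s => if PySem.Str.isIn s low then (1 : Int) else 0)).sum
        if 0 < score then acc ++ [(score, ln)] else acc) []
     let sortedScored := PySem.List.sorted scored (fun p => p.1) true
     let out := (PySem.List.slice sortedScored none (some 6)).map (fun p => p.2)
     if out ≠ [] then out else PySem.List.slice lines none (some 4))
    =
    (let buckets := lines.foldl (fun (bks : List (List String)) ln =>
        let low := PySem.Str.lower ln
        let score : Int := pvScoreTerms.foldl (fun n s => if PySem.Str.isIn s low then n + 1 else n) 0
        if score ≠ 0 then PySem.List.pySetD bks score (PySem.List.pyGetD bks score [] ++ [ln]) else bks)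
        (List.replicate 20 ([] : List String))
     let out := (PySem.List.pyRange 19 0 (-1)).foldl (fun out s => out ++ PySem.List.pyGetD buckets s []) []
     if out ≠ [] then PySem.List.slice out none (some 6) else PySem.List.slice lines none (some 4)) := by
  dsimp only
  -- normalise A's accumulator loop into filter-and-map
  have hstepA : (fun (acc : List (Int × String)) ln =>
      if 0 < ((pvScoreTerms.map (fun s => if PySem.Str.isIn s (PySem.Str.lower ln) then (1 : Int) else 0)).sum)
      then acc ++ [(((pvScoreTerms.map (fun s => if PySem.Str.isIn s (PySem.Str.lower ln) then (1 : Int) else 0)).sum), ln)]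
      else acc)
      = (fun acc ln => if (fun ln => decide ((0 : Int) < (pvCnt ln : Int))) ln = true
          then acc ++ [((fun ln => ((pvCnt ln : Int), ln)) ln)] else acc) := by
    funext acc ln
    rw [PySem.List.sum_map_ite_one_zero]
    by_cases hc : (0 : Int) < (pvCnt ln : Int) <;> simp [pvCnt]
  rw [hstepA, PySem.List.foldl_append_if, List.nil_append]
  -- normalise B's counter loop
  have hstepB : (fun (bks : List (List String)) ln =>
      if (pvScoreTerms.foldl (fun n s => if PySem.Str.isIn s (PySem.Str.lower ln) then n + 1 else n) (0 : Int)) ≠ 0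
      then PySem.List.pySetD bks
            (pvScoreTerms.foldl (fun n s => if PySem.Str.isIn s (PySem.Str.lower ln) then n + 1 else n) (0 : Int))
            (PySem.List.pyGetD bks
              (pvScoreTerms.foldl (fun n s => if PySem.Str.isIn s (PySem.Str.lower ln) then n + 1 else n) (0 : Int)) [] ++ [ln])
      else bks)
      = (fun bks ln => if ((pvCnt ln : Int)) ≠ 0 then
            PySem.List.pySetD bks (pvCnt ln) (PySem.List.pyGetD bks (pvCnt ln) [] ++ [ln]) else bks) := by
    funext bks ln
    rw [PySem.List.foldl_count_if]
    simp [pvCnt]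
  rw [hstepB, PySem.List.foldl_append_eq_flatMap, List.nil_append]
  -- the descending score list
  have hpair : (PySem.List.pyRange 19 0 (-1)).Pairwise (fun a b => b < a) := by
    rw [PySem.List.pyRange_neg_one_eq_reverse]
    exact List.pairwise_reverse.2 (by simpa using PySem.List.pairwise_lt_pyRange_one 1 20)
  have hsort := pvSortedRevFlatMap (fun p : Int × String => p.1) (PySem.List.pyRange 19 0 (-1)) hpair
      ((lines.filter (fun ln => decide ((0 : Int) < (pvCnt ln : Int)))).map (fun ln => ((pvCnt ln : Int), ln)))
      (by
        intro p hp
        obtain ⟨ln, hln, rfl⟩ := List.mem_map.1 hp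
        have h0 : (0 : Int) < (pvCnt ln : Int) := by simpa using (List.mem_filter.1 hln).2
        have h19 : pvCnt ln ≤ 19 := pvCnt_le ln
        exact PySem.List.mem_pyRange_neg_one.2 ⟨h0, by simp; exact_mod_cast h19⟩)
  rw [hsort, PySem.List.slice_to _ (by norm_num), List.map_take, List.map_flatMap]
  -- per-score buckets agree
  have hbkt : ∀ s ∈ PySem.List.pyRange 19 0 (-1),
      (((lines.filter (fun ln => decide ((0 : Int) < (pvCnt ln : Int)))).map
          (fun ln => ((pvCnt ln : Int), ln))).filter (fun a => a.1 == s)).map (fun p => p.2)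
      = lines.filter (fun ln => ((pvCnt ln : Int)) == s) := by
    intro s hs
    have hs1 : 1 ≤ s ∧ s ≤ 19 := by
      have := PySem.List.mem_pyRange_neg_one.1 hs; omega
    rw [List.filter_map, List.map_map, List.filter_filter]
    have hcongr : ∀ ln ∈ lines,
        ((((fun a : Int × String => a.1 == s) ∘ fun ln => ((pvCnt ln : Int), ln)) ln)
          && decide ((0 : Int) < (pvCnt ln : Int)))
        = (((pvCnt ln : Int)) == s) := by
      intro ln _
      by_cases hc : ((pvCnt ln : Int)) = s
      · simp [Function.comp, hc]; omega
      · simp [Function.comp, hc]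
    rw [List.filter_congr hcongr]
    have hid : ((fun p : Int × String => p.2) ∘ fun ln => ((pvCnt ln : Int), ln)) = id := rfl
    rw [hid, List.map_id]
  have hget := (pvBuckets lines (List.replicate 20 []) (by simp)).2
  have hB : ∀ s ∈ PySem.List.pyRange 19 0 (-1),
      PySem.List.pyGetD (lines.foldl (fun bks ln => if ((pvCnt ln : Int)) ≠ 0 then
          PySem.List.pySetD bks (pvCnt ln) (PySem.List.pyGetD bks (pvCnt ln) [] ++ [ln]) else bks)
        (List.replicate 20 ([] : List String))) s []
      = lines.filter (fun ln => ((pvCnt ln : Int)) == s) := by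
    intro s hs
    have hs1 : 1 ≤ s ∧ s ≤ 19 := by
      have := PySem.List.mem_pyRange_neg_one.1 hs; omega
    rw [hget s hs1.1 hs1.2,
        PySem.List.pyGetD_eq_getElem _ _ (by omega) (by simp; omega)]
    rw [List.getElem_replicate, List.nil_append]
  rw [List.flatMap_congr hbkt, List.flatMap_congr hB]
  -- final truncation / fallback branch
  set M := (PySem.List.pyRange 19 0 (-1)).flatMap
    (fun s => lines.filter (fun ln => ((pvCnt ln : Int)) == s)) with hM
  by_cases hMe : M = []
  · simp [hMe]
  · rw [if_pos (by simp [List.take_eq_nil_iff, hMe]), if_pos hMe,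
        PySem.List.slice_to _ (by norm_num)]

-- ===== VERDICT (by name: the statement is the Claim_ definition above) =====
theorem extract_key_lines_spec : Claim_equal_extract_key_lines := by
  intro text _
  show extract_key_lines text = extract_key_lines_alt text
  unfold extract_key_lines extract_key_lines_alt
  exact pvMain (pvLines text)
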